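-- pv_equiv track=rewrite | github.com/maciejratajski1999/Systemy | MFU.py | simulate_MFU
-- ===== SOURCE A (Python) =====
-- def find_most_used(times_loaded, memory):
--     most_used = ('', 0)
--     currently_loaded = [(page,n) for page, n in times_loaded.items() if page in memory]
--     for page, n in currently_loaded:
--         if n > most_used[1]:
--             most_used = (page, n)
--     return most_used[0]
--
-- def simulate_MFU(pages, memory_size):
--     memory = []
--     times_loaded = {page : 0 for page in pages}
--     for page in pages:
--         if page in memory:
--             continue
--         if len(memory) < memory_size:
--             memory.append(page)
--             times_loaded[page] += 1
--         else:
--             most_used = find_most_used(times_loaded, memory)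
--             memory.remove(most_used)
--             memory.append(page)
--             times_loaded[page] += 1
--     return times_loaded
-- ===== SOURCE B (Python) =====
-- def _insert_sorted(resident, entry):
--     # ordered insertion into resident, kept ascending by (count, -rank); keys are distinct
--     k = 0
--     while k < len(resident) and resident[k][:2] < entry[:2]:
--         k += 1
--     return resident[:k] + [entry] + resident[k:]
--
-- def simulate_MFU(pages, memory_size):
--     order = dict.fromkeys(pages)                 # distinct pages, first-occurrence order
--     rank = {p: i for i, p in enumerate(order)}
--     counts = dict.fromkeys(order, 0)
--     resident = []      # (count, -rank, page) ascending: the eviction victim is always resident[-1]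
--     in_mem = set()
--     for page in pages:
--         if page in in_mem:
--             continue
--         if len(in_mem) >= memory_size:
--             victim = resident.pop()[2]
--             in_mem.discard(victim)
--         counts[page] += 1
--         resident = _insert_sorted(resident, (counts[page], -rank[page], page))
--         in_mem.add(page)
--     return counts
-- ===== Notes on version B (the rewrite author's own statement) =====
-- stated objective: faster
-- what changed: A picks each eviction victim by rescanning the dict of ALL distinct pages with a per-entry list-membership test; B maintains the resident pages as a list kept sorted ascending by (count, -first-occurrence rank) -- counts never change while a page is resident, so an ordered insertion at load time makes the victim always the last element, and eviction is an O(1) pop with no scan at all.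
import Mathlib
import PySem

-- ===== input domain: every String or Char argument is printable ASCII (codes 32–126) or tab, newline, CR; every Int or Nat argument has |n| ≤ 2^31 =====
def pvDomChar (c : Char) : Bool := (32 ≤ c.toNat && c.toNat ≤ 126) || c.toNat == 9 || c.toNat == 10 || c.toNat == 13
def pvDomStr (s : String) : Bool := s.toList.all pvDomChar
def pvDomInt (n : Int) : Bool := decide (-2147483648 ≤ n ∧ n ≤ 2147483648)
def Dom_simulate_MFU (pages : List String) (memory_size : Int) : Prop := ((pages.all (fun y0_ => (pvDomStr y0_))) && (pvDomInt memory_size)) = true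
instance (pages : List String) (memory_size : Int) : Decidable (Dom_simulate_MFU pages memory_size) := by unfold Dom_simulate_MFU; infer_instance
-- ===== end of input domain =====

-- B replaces A's per-eviction scan of ALL distinct pages by a resident list kept sorted ascending by
-- (count, -first-occurrence rank) — counts never change while a page is resident, so ordered insertion
-- at load time makes the victim always the last element and eviction an O(1) pop; objective: faster.

-- ===== PORT A =====
def find_most_used (times_loaded : PySem.Dict String Int) (memory : List String) : String :=
  let currently_loaded := times_loaded.items.filter (fun pn => memory.contains pn.1)
  let most_used := currently_loaded.foldl (fun mu pn => if pn.2 > mu.2 then pn else mu) (("", (0 : Int)))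
  most_used.1

-- one iteration of A's 'for page in pages' loop; 'times_loaded[page] += 1' is modify with default 0,
-- exact here because every page of the loop is a key of times_loaded; 'memory.remove(most_used)' raises
-- ValueError when most_used ∉ memory — that happens exactly outside Pre_, where the port keeps memory.
def simAStep (memory_size : Int) (st : List String × PySem.Dict String Int) (page : String) :
    List String × PySem.Dict String Int :=
  if st.1.contains page then st
  else if (st.1.length : Int) < memory_size then
    (st.1 ++ [page], st.2.modify page 0 (· + 1))
  else
    let most_used := find_most_used st.2 st.1
    (((PySem.List.remove? st.1 most_used).getD st.1) ++ [page], st.2.modify page 0 (· + 1))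

def simulate_MFU (pages : List String) (memory_size : Int) : List (String × Int) :=
  let times_loaded := pages.foldl (fun d p => d.insert p 0) PySem.Dict.empty
  (pages.foldl (simAStep memory_size) ([], times_loaded)).2.items

-- ===== PORT B =====
-- Python's tuple comparison resident[k][:2] < entry[:2] on a pair of ints
def pyLtII (u v : Int × Int) : Bool := decide (u.1 < v.1) || (decide (u.1 = v.1) && decide (u.2 < v.2))

-- the 'while k < len(resident) and resident[k][:2] < entry[:2]: k += 1' loop of _insert_sorted,
-- as the obvious structural recursion over the part of the list not yet passed
def insPos : List (Int × Int × String) → Int × Int → Nat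
  | [], _ => 0
  | e :: t, key => if pyLtII (e.1, e.2.1) key then insPos t key + 1 else 0

-- resident[:k] + [entry] + resident[k:]; the slices are List.take/drop, exact since 0 ≤ k ≤ len resident
def insertSorted (resident : List (Int × Int × String)) (entry : Int × Int × String) :
    List (Int × Int × String) :=
  resident.take (insPos resident (entry.1, entry.2.1)) ++ [entry]
    ++ resident.drop (insPos resident (entry.1, entry.2.1))

-- one iteration of B's loop; state = (resident, in_mem, counts); 'resident.pop()' raises IndexError on
-- an empty list — exactly outside Pre_, where the port keeps the state via the '.getD' completions;
-- 'counts[page] += 1' is modify with default 0, exact because every page of the loop is a key of counts.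
def simBStep (memory_size : Int) (rank : PySem.Dict String Int)
    (st : List (Int × Int × String) × PySem.Set String × PySem.Dict String Int) (page : String) :
    List (Int × Int × String) × PySem.Set String × PySem.Dict String Int :=
  if PySem.Set.contains st.2.1 page then st
  else
    let rm :=
      if memory_size ≤ PySem.Set.len st.2.1 then
        let victim := (st.1.getLast?.map (fun e => e.2.2)).getD ""
        (st.1.dropLast, PySem.Set.discard st.2.1 victim)
      else (st.1, st.2.1)
    let counts := st.2.2.modify page 0 (· + 1)
    let entry : Int × Int × String := (counts.getD page 0, -(rank.getD page 0), page)
    (insertSorted rm.1 entry, PySem.Set.add rm.2 page, counts)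

-- dict.fromkeys(pages) is PySem.List.dedup; dict.fromkeys(order, 0) is the same keys paired with 0.
def simulate_MFU_alt (pages : List String) (memory_size : Int) : List (String × Int) :=
  let order := PySem.List.dedup pages
  let rank := (PySem.List.enumerate order 0).foldl (fun d ip => d.insert ip.2 ip.1) PySem.Dict.empty
  let counts := PySem.Dict.mk (order.map (fun p => (p, (0 : Int))))
  (pages.foldl (simBStep memory_size rank) ([], PySem.Set.empty, counts)).2.2.items

-- ===== PRECONDITION & SPEC =====
-- Pre_ excludes exactly the inputs where Python A raises ValueError (a non-empty page list with
-- memory_size < 1 makes A remove from an empty memory); Python B raises there too (pop from an empty list).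
def Pre_simulate_MFU (pages : List String) (memory_size : Int) : Prop :=
  pages = [] ∨ 1 ≤ memory_size
instance (pages : List String) (memory_size : Int) : Decidable (Pre_simulate_MFU pages memory_size) := by unfold Pre_simulate_MFU; infer_instance

def pvWitness_simulate_MFU : List String × Int := (["a", "b", "a", "c"], 2)

def Spec_simulate_MFU (pages : List String) (memory_size : Int) (out : List (String × Int)) : Prop := out = simulate_MFU_alt pages memory_size
instance (pages : List String) (memory_size : Int) (out : List (String × Int)) : Decidable (Spec_simulate_MFU pages memory_size out) := by unfold Spec_simulate_MFU; infer_instance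

-- ===== CLAIM (what is proved, stated in full; the proofs are below) =====
def Claim_equal_simulate_MFU : Prop := ∀ (pages : List String) (memory_size : Int), Dom_simulate_MFU pages memory_size → Pre_simulate_MFU pages memory_size → Spec_simulate_MFU pages memory_size (simulate_MFU pages memory_size)

-- ===== LEMMAS AND PROOFS =====

-- lexicographic orders on Int pairs (what Python's tuple comparison gives)
def lexLe (u v : Int × Int) : Prop := u.1 < v.1 ∨ (u.1 = v.1 ∧ u.2 ≤ v.2)
def lexLt (u v : Int × Int) : Prop := u.1 < v.1 ∨ (u.1 = v.1 ∧ u.2 < v.2)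

def keyOf (e : Int × Int × String) : Int × Int := (e.1, e.2.1)

theorem pyLtII_iff (u v : Int × Int) : pyLtII u v = true ↔ lexLt u v := by
  unfold pyLtII lexLt; simp

theorem lexLe_antisymm {a b : Int × Int} (h1 : lexLe a b) (h2 : lexLe b a) : a = b := by
  unfold lexLe at *
  have : a.1 = b.1 ∧ a.2 = b.2 := by omega
  exact Prod.ext this.1 this.2

theorem lexLt_of_not_lt {a b : Int × Int} (h : ¬ lexLt a b) (hne : a ≠ b) : lexLt b a := by
  unfold lexLt at *
  by_cases h1 : a.1 = b.1
  · have h2 : a.2 ≠ b.2 := fun h2 => hne (Prod.ext h1 h2)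
    omega
  · omega

theorem lexLt_le {a b : Int × Int} (h : lexLt a b) : lexLe a b := by
  unfold lexLt at h; unfold lexLe; omega

theorem lexLt_trans {a b c : Int × Int} (h1 : lexLt a b) (h2 : lexLt b c) : lexLt a c := by
  unfold lexLt at *; omega

theorem nodupSnoc {l : List String} {x : String} (h : l.Nodup) (hx : x ∉ l) : (l ++ [x]).Nodup := by
  simp [List.nodup_append, h]
  exact fun a ha hax => hx (hax ▸ ha)

theorem initA_eq (xs : List String) :
    xs.foldl (fun d p => d.insert p 0) PySem.Dict.empty
      = PySem.Dict.mk ((PySem.List.dedup xs).map (fun p => (p, (0 : Int)))) := by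
  induction xs using List.reverseRecOn with
  | nil => rfl
  | append_singleton xs x ih =>
    rw [List.foldl_append, List.foldl_cons, List.foldl_nil, ih]
    rw [PySem.List.dedup_eq_ofList, PySem.List.dedup_eq_ofList, PySem.Set.ofList_append_singleton]
    by_cases hx : x ∈ PySem.Set.ofList xs
    · rw [PySem.Set.add_of_mem hx]
      apply PySem.Dict.ext
      rw [PySem.Dict.items_insert_of_contains]
      · rw [List.map_map]
        apply List.map_congr_left
        intro p hp
        by_cases h : p = x <;> simp [h]
      · rw [PySem.Set.mem_ofList] at hx
        simp [hx]
    · rw [PySem.Set.add_of_not_mem hx]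
      apply PySem.Dict.ext
      rw [PySem.Dict.items_insert_of_not_contains]
      · simp [List.map_append]
      · rw [PySem.Set.mem_ofList] at hx
        simp only [PySem.Dict.contains]
        simp
        intro y hy hxy; exact hx (hxy ▸ hy)

theorem init_keys (xs : List String) :
    (PySem.Dict.mk ((PySem.List.dedup xs).map (fun q => (q, (0 : Int))))).keys = PySem.List.dedup xs := by
  simp only [PySem.Dict.keys]
  rw [List.map_map]
  simp [Function.comp_def]

theorem init_getD (xs : List String) (p : String) :
    (PySem.Dict.mk ((PySem.List.dedup xs).map (fun q => (q, (0 : Int))))).getD p 0 = 0 := by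
  by_cases hp : p ∈ PySem.List.dedup xs
  · have hm : (p, (0:Int)) ∈ ((PySem.List.dedup xs).map (fun q => (q, (0 : Int)))) :=
      List.mem_map_of_mem hp
    have hnd : (PySem.Dict.mk ((PySem.List.dedup xs).map (fun q => (q, (0 : Int))))).keys.Nodup := by
      rw [init_keys]; exact PySem.List.nodup_dedup xs
    exact PySem.Dict.getD_of_mem_items _ hm hnd 0
  · apply PySem.Dict.getD_of_not_contains
    simp
    intro y hy hxy
    exact hp (by rw [PySem.List.mem_dedup] at *; exact hxy ▸ hy)

theorem rank_items (order : List String) (hnd : order.Nodup) :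
    ((PySem.List.enumerate order 0).foldl (fun d ip => d.insert ip.2 ip.1) PySem.Dict.empty).items
      = (PySem.List.enumerate order 0).map (fun ip => (ip.2, ip.1)) := by
  have h := PySem.Dict.items_foldl_insert_fresh (PySem.List.enumerate order 0)
    (fun ip => ip.2) (fun ip => ip.1) PySem.Dict.empty
    (fun a _ => PySem.Dict.contains_empty _)
    (by rw [PySem.List.map_snd_enumerate]; exact hnd)
  simpa using h

theorem rank_keys (order : List String) (hnd : order.Nodup) :
    ((PySem.List.enumerate order 0).foldl (fun d ip => d.insert ip.2 ip.1) PySem.Dict.empty).keys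
      = order := by
  simp only [PySem.Dict.keys, rank_items order hnd, List.map_map]
  have : ((fun x => x.1) ∘ fun ip : Int × String => (ip.2, ip.1)) = fun ip : Int × String => ip.2 := rfl
  rw [this, PySem.List.map_snd_enumerate]

theorem rank_getD (order : List String) (hnd : order.Nodup) (j : Nat) (hj : j < order.length) :
    ((PySem.List.enumerate order 0).foldl (fun d ip => d.insert ip.2 ip.1) PySem.Dict.empty).getD order[j] 0
      = (j : Int) := by
  have hm : ((j : Int), order[j]) ∈ PySem.List.enumerate order 0 := by
    rw [PySem.List.mem_enumerate_iff]
    exact ⟨j, hj, by simp⟩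
  have hm2 : (order[j], (j : Int)) ∈ ((PySem.List.enumerate order 0).foldl (fun d ip => d.insert ip.2 ip.1) PySem.Dict.empty).items := by
    rw [rank_items order hnd]
    exact List.mem_map_of_mem (f := fun ip : Int × String => (ip.2, ip.1)) hm
  exact PySem.Dict.getD_of_mem_items _ hm2 (by rw [rank_keys order hnd]; exact hnd) 0

theorem rank_mono (order : List String) (hnd : order.Nodup) :
    (order.map (fun p => ((PySem.List.enumerate order 0).foldl (fun d ip => d.insert ip.2 ip.1) PySem.Dict.empty).getD p 0)).Pairwise (· < ·) := by
  rw [List.pairwise_iff_getElem]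
  intro i j hi hj hij
  simp only [List.length_map] at hi hj
  simp only [List.getElem_map]
  rw [rank_getD order hnd i hi, rank_getD order hnd j hj]
  exact_mod_cast hij

theorem rank_inj (order : List String) (hnd : order.Nodup) {p q : String}
    (hp : p ∈ order) (hq : q ∈ order)
    (h : ((PySem.List.enumerate order 0).foldl (fun d ip => d.insert ip.2 ip.1) PySem.Dict.empty).getD p 0
        = ((PySem.List.enumerate order 0).foldl (fun d ip => d.insert ip.2 ip.1) PySem.Dict.empty).getD q 0) :
    p = q := by
  obtain ⟨i, hi, rfl⟩ := List.mem_iff_getElem.mp hp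
  obtain ⟨j, hj, rfl⟩ := List.mem_iff_getElem.mp hq
  rw [rank_getD order hnd i hi, rank_getD order hnd j hj] at h
  have : i = j := by exact_mod_cast h
  subst this; rfl

theorem afold_spec (rk : String → Int) (L : List (String × Int)) (acc : String × Int)
    (hp : (L.map (fun p => rk p.1)).Pairwise (· < ·)) :
    (L.foldl (fun mu pn => if pn.2 > mu.2 then pn else mu) acc = acc ∨
      (L.foldl (fun mu pn => if pn.2 > mu.2 then pn else mu) acc ∈ L ∧
        acc.2 < (L.foldl (fun mu pn => if pn.2 > mu.2 then pn else mu) acc).2)) ∧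
    (∀ q ∈ L, q.2 ≤ (L.foldl (fun mu pn => if pn.2 > mu.2 then pn else mu) acc).2) ∧
    (∀ q ∈ L, q.2 = (L.foldl (fun mu pn => if pn.2 > mu.2 then pn else mu) acc).2 →
      L.foldl (fun mu pn => if pn.2 > mu.2 then pn else mu) acc ≠ acc →
      rk ((L.foldl (fun mu pn => if pn.2 > mu.2 then pn else mu) acc).1) ≤ rk q.1) := by
  induction L generalizing acc with
  | nil => simp
  | cons p L ih =>
    simp only [List.map_cons, List.pairwise_cons] at hp
    obtain ⟨hhead, htail⟩ := hp
    simp only [List.foldl_cons]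
    by_cases hc : p.2 > acc.2
    · simp only [if_pos hc]
      obtain ⟨ih1, ih2, ih3⟩ := ih p htail
      set r := L.foldl (fun mu pn => if pn.2 > mu.2 then pn else mu) p with hr
      refine ⟨?_, ?_, ?_⟩
      · rcases ih1 with h | ⟨hmem, hlt⟩
        · exact Or.inr ⟨by rw [h]; exact List.mem_cons_self, by rw [h]; exact hc⟩
        · exact Or.inr ⟨List.mem_cons_of_mem _ hmem, lt_trans hc hlt⟩
      · intro q hq
        rcases List.mem_cons.mp hq with rfl | hq'
        · rcases ih1 with h | ⟨_, hlt⟩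
          · rw [h]
          · exact le_of_lt hlt
        · exact ih2 q hq'
      · intro q hq heq _
        rcases List.mem_cons.mp hq with rfl | hq'
        · rcases ih1 with h | ⟨hmem, hlt⟩
          · rw [h]
          · omega
        · rcases ih1 with h | ⟨hmem, hlt⟩
          · rw [h]; exact le_of_lt (hhead (rk q.1) (List.mem_map_of_mem hq'))
          · exact ih3 q hq' heq (by intro h; rw [h] at hlt; exact lt_irrefl _ hlt)
    · simp only [if_neg hc]
      obtain ⟨ih1, ih2, ih3⟩ := ih acc htail
      refine ⟨ih1.imp id (fun ⟨hm, hl⟩ => ⟨List.mem_cons_of_mem _ hm, hl⟩), ?_, ?_⟩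
      · intro q hq
        rcases List.mem_cons.mp hq with rfl | hq'
        · rcases ih1 with h | ⟨_, hlt⟩
          · rw [h]; omega
          · omega
        · exact ih2 q hq'
      · intro q hq heq hne
        rcases List.mem_cons.mp hq with rfl | hq'
        · rcases ih1 with h | ⟨hmem, hlt⟩
          · exact absurd h hne
          · omega
        · exact ih3 q hq' heq hne

-- A's find_most_used picks a resident page whose (count, -rank) key is lexicographically maximal
theorem A_evict (pages : List String) (d : PySem.Dict String Int) (memA : List String)
    (hkeys : d.keys = PySem.List.dedup pages)
    (hsub : ∀ p ∈ memA, p ∈ PySem.List.dedup pages)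
    (hone : ∀ p ∈ memA, 1 ≤ d.getD p 0)
    (hne : memA ≠ []) :
    find_most_used d memA ∈ memA ∧
    ∀ q ∈ memA,
      lexLe (d.getD q 0, -(((PySem.List.enumerate (PySem.List.dedup pages) 0).foldl (fun d ip => d.insert ip.2 ip.1) PySem.Dict.empty).getD q 0))
        (d.getD (find_most_used d memA) 0, -(((PySem.List.enumerate (PySem.List.dedup pages) 0).foldl (fun d ip => d.insert ip.2 ip.1) PySem.Dict.empty).getD (find_most_used d memA) 0)) := by
  set D0 := PySem.List.dedup pages with hD0
  set rankd := (PySem.List.enumerate D0 0).foldl (fun d ip => d.insert ip.2 ip.1) PySem.Dict.empty with hrankd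
  set rk : String → Int := fun q => rankd.getD q 0 with hrk
  have hndD0 : D0.Nodup := PySem.List.nodup_dedup pages
  have hndk : d.keys.Nodup := hkeys ▸ hndD0
  have hitems : d.items = D0.map (fun k => (k, d.getD k 0)) := by
    rw [PySem.Dict.items_eq_map_keys d hndk 0, hkeys]
  set M0 := D0.filter (fun k => memA.contains k) with hM0
  have hL : d.items.filter (fun pn => memA.contains pn.1)
      = M0.map (fun k => (k, d.getD k 0)) := by
    rw [hitems, List.filter_map]
    rfl
  have hM0mem : ∀ k, k ∈ M0 ↔ k ∈ memA := by
    intro k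
    rw [hM0, List.mem_filter]
    constructor
    · rintro ⟨_, h⟩; simpa using h
    · intro h; exact ⟨hsub k h, by simpa using h⟩
  have hpair : ((M0.map (fun k => (k, d.getD k 0))).map (fun p => rk p.1)).Pairwise (· < ·) := by
    rw [List.map_map]
    have : ((fun p : String × Int => rk p.1) ∘ fun k => (k, d.getD k 0)) = rk := rfl
    rw [this]
    have hsl : M0.Sublist D0 := List.filter_sublist
    exact (rank_mono D0 hndD0).sublist (hsl.map rk)
  obtain ⟨a0, ha0⟩ := List.exists_mem_of_ne_nil memA hne
  have ha0M0 : a0 ∈ M0 := (hM0mem a0).mpr ha0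
  set L := M0.map (fun k => (k, d.getD k 0)) with hLdef
  have ha0L : (a0, d.getD a0 0) ∈ L := List.mem_map_of_mem ha0M0
  obtain ⟨h1, h2, h3⟩ := afold_spec rk L ("", 0) hpair
  set r := L.foldl (fun mu pn => if pn.2 > mu.2 then pn else mu) ("", (0:Int)) with hrdef
  have hr2pos : 1 ≤ r.2 := le_trans (hone a0 ha0) (h2 _ ha0L)
  have hrL : r ∈ L := by
    rcases h1 with h | ⟨h, _⟩
    · rw [h] at hr2pos; norm_num at hr2pos
    · exact h
  have hrneacc : r ≠ ("", 0) := by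
    intro h; rw [h] at hr2pos; norm_num at hr2pos
  obtain ⟨k0, hk0M0, hk0eq⟩ := List.mem_map.mp hrL
  have hk0memA : k0 ∈ memA := (hM0mem k0).mp hk0M0
  have hr1 : r.1 = k0 := by rw [← hk0eq]
  have hr2 : r.2 = d.getD k0 0 := by rw [← hk0eq]
  have hfmu : find_most_used d memA = k0 := by
    unfold find_most_used
    simp only [hL, ← hrdef, hr1]
  rw [hfmu]
  refine ⟨hk0memA, ?_⟩
  intro q hq
  have hqL : (q, d.getD q 0) ∈ L := List.mem_map_of_mem ((hM0mem q).mpr hq)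
  have hle : d.getD q 0 ≤ r.2 := h2 _ hqL
  rw [hr2] at hle
  by_cases hceq : d.getD q 0 = d.getD k0 0
  · have h5 := h3 _ hqL (by simpa using (hceq.trans hr2.symm)) hrneacc
    rw [hr1] at h5
    have h6 : rankd.getD k0 0 ≤ rankd.getD q 0 := h5
    unfold lexLe
    right
    exact ⟨hceq, by omega⟩
  · unfold lexLe
    left
    omega

-- insertSorted, rewritten structurally
theorem insPos_cons (h : Int × Int × String) (t : List (Int × Int × String)) (key : Int × Int) :
    insPos (h :: t) key = if pyLtII (h.1, h.2.1) key then insPos t key + 1 else 0 := rfl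

theorem insertSorted_cons_pos (h e : Int × Int × String) (t : List (Int × Int × String))
    (hc : pyLtII (keyOf h) (keyOf e) = true) :
    insertSorted (h :: t) e = h :: insertSorted t e := by
  unfold insertSorted
  rw [insPos_cons, if_pos (show pyLtII (h.1, h.2.1) (e.1, e.2.1) = true from hc),
    List.take_succ_cons, List.drop_succ_cons]
  rfl

theorem insertSorted_cons_neg (h e : Int × Int × String) (t : List (Int × Int × String))
    (hc : pyLtII (keyOf h) (keyOf e) = false) :
    insertSorted (h :: t) e = e :: h :: t := by
  unfold insertSorted
  rw [insPos_cons, if_neg (show ¬ pyLtII (h.1, h.2.1) (e.1, e.2.1) = true by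
    simp only [keyOf] at hc; simp [hc])]
  simp

theorem insertSorted_perm (L : List (Int × Int × String)) (e : Int × Int × String) :
    (insertSorted L e).Perm (e :: L) := by
  unfold insertSorted
  have h := List.perm_middle (a := e) (l₁ := L.take (insPos L (e.1, e.2.1)))
    (l₂ := L.drop (insPos L (e.1, e.2.1)))
  rw [List.take_append_drop] at h
  rw [List.append_assoc, List.singleton_append]
  exact h

theorem mem_insertSorted (L : List (Int × Int × String)) (e x : Int × Int × String) :
    x ∈ insertSorted L e ↔ x = e ∨ x ∈ L := by
  rw [(insertSorted_perm L e).mem_iff]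
  simp

theorem insertSorted_sorted (L : List (Int × Int × String)) (e : Int × Int × String)
    (hs : L.Pairwise (fun a b => lexLt (keyOf a) (keyOf b)))
    (hne : ∀ x ∈ L, keyOf x ≠ keyOf e) :
    (insertSorted L e).Pairwise (fun a b => lexLt (keyOf a) (keyOf b)) := by
  induction L with
  | nil => simp [insertSorted, insPos]
  | cons h t ih =>
    rw [List.pairwise_cons] at hs
    obtain ⟨hh, ht⟩ := hs
    by_cases hc : pyLtII (keyOf h) (keyOf e) = true
    · rw [insertSorted_cons_pos h e t hc]
      rw [List.pairwise_cons]
      constructor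
      · intro x hx
        rcases (mem_insertSorted t e x).mp hx with rfl | hx'
        · exact (pyLtII_iff _ _).mp hc
        · exact hh x hx'
      · exact ih ht (fun x hx => hne x (List.mem_cons_of_mem _ hx))
    · rw [insertSorted_cons_neg h e t (by simpa using hc)]
      have hlt : lexLt (keyOf e) (keyOf h) :=
        lexLt_of_not_lt (fun hl => hc ((pyLtII_iff _ _).mpr hl))
          (fun heq => hne h List.mem_cons_self heq)
      rw [List.pairwise_cons]
      refine ⟨?_, List.pairwise_cons.mpr ⟨hh, ht⟩⟩
      intro x hx
      rcases List.mem_cons.mp hx with rfl | hx'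
      · exact hlt
      · exact lexLt_trans hlt (hh x hx')

-- the last element of a non-empty sorted list is the lexicographic maximum
theorem sorted_last_max (xs : List (Int × Int × String)) (a : Int × Int × String)
    (hs : (xs ++ [a]).Pairwise (fun u v => lexLt (keyOf u) (keyOf v))) :
    ∀ x ∈ xs ++ [a], lexLe (keyOf x) (keyOf a) := by
  intro x hx
  rcases List.mem_append.mp hx with h | h
  · rw [List.pairwise_append] at hs
    exact lexLt_le (hs.2.2 x h a (List.mem_singleton_self a))
  · rw [List.mem_singleton] at h
    subst h
    unfold lexLe
    omega

theorem loop_eq (pages : List String) (memory_size : Int) (hms : 1 ≤ memory_size) :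
    ∀ (rest : List String) (memA : List String) (resident : List (Int × Int × String))
      (in_mem : PySem.Set String) (d : PySem.Dict String Int),
    (∀ p ∈ rest, p ∈ pages) →
    memA.Nodup →
    List.Nodup in_mem →
    (∀ x, x ∈ in_mem ↔ x ∈ memA) →
    (∀ x : String, (∃ e ∈ resident, e.2.2 = x) ↔ x ∈ memA) →
    (resident.map (fun e => e.2.2)).Nodup →
    (∀ e ∈ resident, e.1 = d.getD e.2.2 0 ∧
      e.2.1 = -(((PySem.List.enumerate (PySem.List.dedup pages) 0).foldl (fun d ip => d.insert ip.2 ip.1) PySem.Dict.empty).getD e.2.2 0)) →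
    resident.Pairwise (fun a b => lexLt (keyOf a) (keyOf b)) →
    (∀ p ∈ memA, p ∈ PySem.List.dedup pages) →
    (∀ p ∈ memA, 1 ≤ d.getD p 0) →
    (∀ p, 0 ≤ d.getD p 0) →
    d.keys = PySem.List.dedup pages →
    (rest.foldl (simAStep memory_size) (memA, d)).2
      = (rest.foldl (simBStep memory_size ((PySem.List.enumerate (PySem.List.dedup pages) 0).foldl (fun d ip => d.insert ip.2 ip.1) PySem.Dict.empty)) (resident, in_mem, d)).2.2 := by
  intro rest
  induction rest with
  | nil => intros; rfl
  | cons page rest ih =>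
    intro memA resident in_mem d hrest hAnd hSnd hmemS hmemR hRnd hfields hsorted hsub hone hnn hkeys
    set rankd := (PySem.List.enumerate (PySem.List.dedup pages) 0).foldl (fun d ip => d.insert ip.2 ip.1) PySem.Dict.empty with hrankd
    set rk : String → Int := fun q => rankd.getD q 0 with hrk
    have hndD0 : (PySem.List.dedup pages).Nodup := PySem.List.nodup_dedup pages
    have hpage : page ∈ pages := hrest page List.mem_cons_self
    have hpageD0 : page ∈ PySem.List.dedup pages := by rw [PySem.List.mem_dedup]; exact hpage
    have hrest' : ∀ p ∈ rest, p ∈ pages := fun p hp => hrest p (List.mem_cons_of_mem _ hp)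
    simp only [List.foldl_cons]
    by_cases hin : page ∈ memA
    · have hA : simAStep memory_size (memA, d) page = (memA, d) := by
        unfold simAStep
        simp [hin]
      have hB : simBStep memory_size rankd (resident, in_mem, d) page = (resident, in_mem, d) := by
        unfold simBStep
        simp [PySem.Set.contains, (hmemS page).mpr hin]
      rw [hA, hB]
      exact ih memA resident in_mem d hrest' hAnd hSnd hmemS hmemR hRnd hfields hsorted hsub hone hnn hkeys
    · have hinS : page ∉ in_mem := fun h => hin ((hmemS page).mp h)
      have hlen : in_mem.length = memA.length :=
        ((List.perm_ext_iff_of_nodup hSnd hAnd).mpr hmemS).length_eq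
      set d' := d.modify page 0 (· + 1) with hd'
      have hkeys' : d'.keys = PySem.List.dedup pages := by
        rw [hd', PySem.Dict.keys_modify, PySem.Dict.keys_insert_of_contains, hkeys]
        rw [PySem.Dict.contains_iff_mem_keys, hkeys]
        exact hpageD0
      have hnn' : ∀ p, 0 ≤ d'.getD p 0 := by
        intro p
        rw [hd', PySem.Dict.getD_modify]
        split_ifs with h
        · have := hnn page; omega
        · exact hnn p
      have hgetD_ne : ∀ q, q ≠ page → d'.getD q 0 = d.getD q 0 := by
        intro q hq
        rw [hd', PySem.Dict.getD_modify]
        split_ifs with h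
        · exact absurd h hq
        · rfl
      have hone'' : ∀ p ∈ memA, 1 ≤ d'.getD p 0 := by
        intro p hp
        by_cases h : p = page
        · subst h; exact absurd hp hin
        · rw [hgetD_ne p h]; exact hone p hp
      have honepage : 1 ≤ d'.getD page 0 := by
        rw [hd', PySem.Dict.getD_modify]
        rw [if_pos rfl]
        show 1 ≤ d.getD page 0 + 1
        have := hnn page; omega
      -- the entry B inserts
      set entry : Int × Int × String := (d'.getD page 0, -(rankd.getD page 0), page) with hentry
      have hfields_entry : entry.1 = d'.getD entry.2.2 0 ∧ entry.2.1 = -(rankd.getD entry.2.2 0) :=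
        ⟨rfl, rfl⟩
      by_cases hroom : (memA.length : Int) < memory_size
      · have hA : simAStep memory_size (memA, d) page = (memA ++ [page], d') := by
          unfold simAStep
          simp only
          rw [if_neg (by simp [hin]), if_pos hroom]
        have hB : simBStep memory_size rankd (resident, in_mem, d) page
            = (insertSorted resident entry, PySem.Set.add in_mem page, d') := by
          unfold simBStep
          simp only
          rw [if_neg (by simp [PySem.Set.contains, hinS])]
          rw [if_neg (show ¬ memory_size ≤ PySem.Set.len in_mem by
            simp only [PySem.Set.len]; omega)]
        rw [hA, hB, PySem.Set.add_of_not_mem hinS]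
        have hRne : ∀ e ∈ resident, e.2.2 ≠ page := by
          intro e he h
          exact hin ((hmemR page).mp ⟨e, he, h⟩)
        have hfields' : ∀ e ∈ insertSorted resident entry,
            e.1 = d'.getD e.2.2 0 ∧ e.2.1 = -(rankd.getD e.2.2 0) := by
          intro e he
          rcases (mem_insertSorted resident entry e).mp he with rfl | he'
          · exact hfields_entry
          · obtain ⟨h1, h2⟩ := hfields e he'
            exact ⟨by rw [h1, hgetD_ne e.2.2 (hRne e he')], h2⟩
        have hkeyne : ∀ x ∈ resident, keyOf x ≠ keyOf entry := by
          intro x hx heq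
          have h2 : x.2.1 = entry.2.1 := congrArg Prod.snd heq
          have hx2 : x.2.2 ∈ memA := (hmemR x.2.2).mp ⟨x, hx, rfl⟩
          have := (hfields x hx).2
          rw [this] at h2
          have : rankd.getD x.2.2 0 = rankd.getD page 0 := by
            simp only [hentry] at h2; omega
          exact hRne x hx (rank_inj (PySem.List.dedup pages) hndD0 (hsub _ hx2) hpageD0 this)
        apply ih
        · exact hrest'
        · exact nodupSnoc hAnd hin
        · exact nodupSnoc hSnd hinS
        · intro x
          simp only [List.mem_append, List.mem_singleton]
          rw [hmemS x]
        · intro x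
          rw [List.mem_append, List.mem_singleton, ← hmemR x]
          constructor
          · rintro ⟨e, he, rfl⟩
            rcases (mem_insertSorted resident entry e).mp he with rfl | he'
            · exact Or.inr rfl
            · exact Or.inl ⟨e, he', rfl⟩
          · rintro (⟨e, he, rfl⟩ | rfl)
            · exact ⟨e, (mem_insertSorted resident entry e).mpr (Or.inr he), rfl⟩
            · exact ⟨entry, (mem_insertSorted resident entry entry).mpr (Or.inl rfl), rfl⟩
        · have hperm : ((insertSorted resident entry).map (fun e => e.2.2)).Perm
              (page :: resident.map (fun e => e.2.2)) := (insertSorted_perm resident entry).map _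
          rw [hperm.nodup_iff, List.nodup_cons]
          refine ⟨?_, hRnd⟩
          intro h
          obtain ⟨e, he, heq⟩ := List.mem_map.mp h
          exact hRne e he heq
        · exact hfields'
        · exact insertSorted_sorted resident entry hsorted hkeyne
        · intro p hp
          rcases List.mem_append.mp hp with h | h
          · exact hsub p h
          · rw [List.mem_singleton] at h; subst h; exact hpageD0
        · intro p hp
          rcases List.mem_append.mp hp with h | h
          · exact hone'' p h
          · rw [List.mem_singleton] at h; subst h; exact honepage
        · exact hnn'
        · exact hkeys'
      · -- eviction
        have hAne : memA ≠ [] := by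
          intro h; rw [h] at hroom; simp at hroom; omega
        obtain ⟨hmuA, hmuMax⟩ := A_evict pages d memA hkeys hsub hone hAne
        set mu := find_most_used d memA with hmudef
        -- resident is non-empty: write it xs ++ [a]
        rcases List.eq_nil_or_concat resident with hres0 | ⟨xs, a, hres⟩
        · exfalso
          obtain ⟨a0, ha0⟩ := List.exists_mem_of_ne_nil memA hAne
          obtain ⟨e, he, _⟩ := (hmemR a0).mpr ha0
          rw [hres0] at he
          exact List.not_mem_nil he
        rw [List.concat_eq_append] at hres
        subst hres
        have hgetlast : (xs ++ [a]).getLast? = some a := by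
          simp
        have haA : a.2.2 ∈ memA := (hmemR a.2.2).mp ⟨a, (by simp), rfl⟩
        -- a's page is A's victim
        have hamu : a.2.2 = mu := by
          have h1 := hmuMax a.2.2 haA
          obtain ⟨e, he, heq⟩ := (hmemR mu).mpr hmuA
          have h2' := sorted_last_max xs a hsorted e he
          have hfe := hfields e he
          have hfa := hfields a ((by simp))
          have h2 : lexLe (d.getD mu 0, -(rk mu)) (d.getD a.2.2 0, -(rk a.2.2)) := by
            have : keyOf e = (d.getD mu 0, -(rk mu)) := by
              unfold keyOf
              rw [hfe.1, hfe.2, heq]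
            rw [this] at h2'
            have : keyOf a = (d.getD a.2.2 0, -(rk a.2.2)) := by
              unfold keyOf
              rw [hfa.1, hfa.2]
            rw [this] at h2'
            exact h2'
          have hk := lexLe_antisymm h1 h2
          have : rk a.2.2 = rk mu := by
            have h3 : -(rk a.2.2) = -(rk mu) := congrArg Prod.snd hk
            omega
          exact rank_inj (PySem.List.dedup pages) hndD0 (hsub _ haA) (hsub _ hmuA) this
        have hA : simAStep memory_size (memA, d) page = (memA.erase mu ++ [page], d') := by
          unfold simAStep
          simp only
          rw [if_neg (by simp [hin]), if_neg hroom, ← hmudef,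
            PySem.List.remove?_eq_some_erase memA mu hmuA]
          rfl
        have hB : simBStep memory_size rankd (xs ++ [a], in_mem, d) page
            = (insertSorted xs entry, PySem.Set.add (PySem.Set.discard in_mem a.2.2) page, d') := by
          unfold simBStep
          simp only
          rw [if_neg (by simp [PySem.Set.contains, hinS])]
          rw [if_pos (show memory_size ≤ PySem.Set.len in_mem by
            simp only [PySem.Set.len]; omega)]
          rw [hgetlast]
          simp only [Option.map_some, Option.getD_some, List.dropLast_concat]
          rfl
        rw [hA, hB]
        have hRndxs : (xs.map (fun e => e.2.2)).Nodup := by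
          rw [List.map_append] at hRnd
          exact (List.nodup_append.mp hRnd).1
        have hanotxs : ∀ e ∈ xs, e.2.2 ≠ a.2.2 := by
          intro e he heq
          rw [List.map_append, List.nodup_append] at hRnd
          exact hRnd.2.2 e.2.2 (List.mem_map_of_mem he) a.2.2 (by simp) heq
        have hmemxs : ∀ x : String, (∃ e ∈ xs, e.2.2 = x) ↔ x ∈ memA.erase mu := by
          intro x
          rw [hAnd.mem_erase_iff, ← hamu]
          constructor
          · rintro ⟨e, he, rfl⟩
            exact ⟨fun h => hanotxs e he h, (hmemR e.2.2).mp ⟨e, List.mem_append.mpr (Or.inl he), rfl⟩⟩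
          · rintro ⟨hxa, hx⟩
            obtain ⟨e, he, rfl⟩ := (hmemR x).mpr hx
            rcases List.mem_append.mp he with h | h
            · exact ⟨e, h, rfl⟩
            · rw [List.mem_singleton] at h
              subst h
              exact absurd rfl hxa
        have hsortedxs : xs.Pairwise (fun u v => lexLt (keyOf u) (keyOf v)) :=
          (List.pairwise_append.mp hsorted).1
        have hfieldsxs : ∀ e ∈ xs, e.1 = d.getD e.2.2 0 ∧ e.2.1 = -(rankd.getD e.2.2 0) :=
          fun e he => hfields e (List.mem_append.mpr (Or.inl he))
        have hRne : ∀ e ∈ xs, e.2.2 ≠ page := by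
          intro e he h
          exact hin ((hmemR page).mp ⟨e, List.mem_append.mpr (Or.inl he), h⟩)
        have hfields' : ∀ e ∈ insertSorted xs entry,
            e.1 = d'.getD e.2.2 0 ∧ e.2.1 = -(rankd.getD e.2.2 0) := by
          intro e he
          rcases (mem_insertSorted xs entry e).mp he with rfl | he'
          · exact hfields_entry
          · obtain ⟨h1, h2⟩ := hfieldsxs e he'
            exact ⟨by rw [h1, hgetD_ne e.2.2 (hRne e he')], h2⟩
        have hkeyne : ∀ x ∈ xs, keyOf x ≠ keyOf entry := by
          intro x hx heq
          have h2 : x.2.1 = entry.2.1 := congrArg Prod.snd heq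
          have hx2 : x.2.2 ∈ memA := (hmemR x.2.2).mp ⟨x, List.mem_append.mpr (Or.inl hx), rfl⟩
          have := (hfieldsxs x hx).2
          rw [this] at h2
          have : rankd.getD x.2.2 0 = rankd.getD page 0 := by
            simp only [hentry] at h2; omega
          exact hRne x hx (rank_inj (PySem.List.dedup pages) hndD0 (hsub _ hx2) hpageD0 this)
        have hpagenotdisc : page ∉ PySem.Set.discard in_mem a.2.2 := by
          intro h
          exact hinS ((PySem.Set.mem_discard _ _ _).mp h).1
        rw [PySem.Set.add_of_not_mem hpagenotdisc]
        apply ih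
        · exact hrest'
        · exact nodupSnoc (hAnd.erase mu) (fun h => hin (List.mem_of_mem_erase h))
        · exact nodupSnoc (PySem.Set.nodup_discard in_mem a.2.2 hSnd) hpagenotdisc
        · intro x
          simp only [List.mem_append, List.mem_singleton]
          rw [PySem.Set.mem_discard, hamu, hmemS x, hAnd.mem_erase_iff]
          tauto
        · intro x
          rw [List.mem_append, List.mem_singleton, ← hmemxs x]
          constructor
          · rintro ⟨e, he, rfl⟩
            rcases (mem_insertSorted xs entry e).mp he with rfl | he'
            · exact Or.inr rfl
            · exact Or.inl ⟨e, he', rfl⟩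
          · rintro (⟨e, he, rfl⟩ | rfl)
            · exact ⟨e, (mem_insertSorted xs entry e).mpr (Or.inr he), rfl⟩
            · exact ⟨entry, (mem_insertSorted xs entry entry).mpr (Or.inl rfl), rfl⟩
        · have hperm : ((insertSorted xs entry).map (fun e => e.2.2)).Perm
              (page :: xs.map (fun e => e.2.2)) := (insertSorted_perm xs entry).map _
          rw [hperm.nodup_iff, List.nodup_cons]
          refine ⟨?_, hRndxs⟩
          intro h
          obtain ⟨e, he, heq⟩ := List.mem_map.mp h
          exact hRne e he heq
        · exact hfields'
        · exact insertSorted_sorted xs entry hsortedxs hkeyne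
        · intro p hp
          rcases List.mem_append.mp hp with h | h
          · exact hsub p (List.mem_of_mem_erase h)
          · rw [List.mem_singleton] at h; subst h; exact hpageD0
        · intro p hp
          rcases List.mem_append.mp hp with h | h
          · exact hone'' p (List.mem_of_mem_erase h)
          · rw [List.mem_singleton] at h; subst h; exact honepage
        · exact hnn'
        · exact hkeys'

-- ===== VERDICT (by name: the statement is the Claim_ definition above) =====
theorem simulate_MFU_spec : Claim_equal_simulate_MFU := by
  unfold Claim_equal_simulate_MFU
  intro pages memory_size _ hpre
  unfold Spec_simulate_MFU simulate_MFU simulate_MFU_alt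
  simp only
  rw [initA_eq]
  rcases hpre with rfl | hms
  · rfl
  · have h := loop_eq pages memory_size hms pages [] [] PySem.Set.empty
      (PySem.Dict.mk ((PySem.List.dedup pages).map (fun p => (p, (0 : Int)))))
      (fun p hp => hp) List.nodup_nil List.nodup_nil
      (fun x => Iff.rfl)
      (by intro x; constructor
          · rintro ⟨e, he, _⟩; exact absurd he (List.not_mem_nil)
          · intro h; exact absurd h (List.not_mem_nil))
      List.nodup_nil
      (fun e he => absurd he (List.not_mem_nil))
      List.Pairwise.nil
      (fun p hp => absurd hp (List.not_mem_nil))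
      (fun p hp => absurd hp (List.not_mem_nil))
      (fun p => le_of_eq (init_getD pages p).symm)
      (init_keys pages)
    exact congrArg PySem.Dict.items h
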